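-- pv_equiv track=rewrite | github.com/Priyeshpandey/LLD | Design Patterns/Iterator_pattern.py | sentence_genr
-- ===== SOURCE A (Python) =====
-- def sentence_genr(sentence):
--     i = 0
--     n = len(sentence)
--     while i < n:
--         word = ""
--         while i<n and sentence[i]!=" ":
--             word += sentence[i]
--             i+=1
--         yield word
--         i+=1
-- ===== SOURCE B (Python) =====
-- def sentence_genr(sentence):
--     parts = sentence.split(" ")
--     if parts[-1] == "":
--         parts.pop()
--     yield from parts
-- ===== Notes on version B (the rewrite author's own statement) =====
-- stated objective: faster
-- what changed: B replaces the index-driven per-character scan with a word accumulator by one library str.split on the single-space separator followed by dropping the one trailing empty token, then yields the list.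
import Mathlib
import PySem

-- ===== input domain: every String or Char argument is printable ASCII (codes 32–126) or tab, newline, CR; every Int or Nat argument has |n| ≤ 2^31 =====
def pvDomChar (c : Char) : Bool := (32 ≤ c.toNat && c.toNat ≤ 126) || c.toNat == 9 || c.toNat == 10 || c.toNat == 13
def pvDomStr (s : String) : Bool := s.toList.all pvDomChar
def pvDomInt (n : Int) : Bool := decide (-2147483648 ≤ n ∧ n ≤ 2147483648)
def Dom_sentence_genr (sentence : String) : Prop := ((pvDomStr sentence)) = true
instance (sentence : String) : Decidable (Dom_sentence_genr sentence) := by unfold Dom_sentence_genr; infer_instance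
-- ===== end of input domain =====

-- B replaces A's index-driven character scan (word accumulator, skip-one-separator) by
-- one library split on the space separator followed by dropping the single trailing empty token.

-- ===== PORT A =====
-- A's two nested while-loops, fused: the inner loop accumulates `word` char by char,
-- a space (or end of string) yields `word`; the outer guard `i < n` re-checks before a new word.
def sentenceGenrGoA : List Char → String → List String
  | [], word => [word]                 -- inner loop hit the end: yield word, i+1 ≥ n, outer stops
  | c :: rest, word =>
    if c = ' ' then                    -- inner loop stops at the space: yield word, i += 1
      word :: (if rest.isEmpty then [] else sentenceGenrGoA rest "")
    else
      sentenceGenrGoA rest (word.push c)   -- word += sentence[i]; i += 1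

def sentence_genr (sentence : String) : List String :=
  if sentence.toList.isEmpty then [] else sentenceGenrGoA sentence.toList ""

-- ===== PORT B =====
def sentence_genr_alt (sentence : String) : List String :=
  let parts := (PySem.Str.split? sentence " ").getD []   -- sentence.split(" ")
  if parts.getLast? = some "" then parts.dropLast else parts   -- parts.pop() of the trailing ""

-- ===== PRECONDITION & SPEC =====
def Spec_sentence_genr (sentence : String) (out : List String) : Prop := out = sentence_genr_alt sentence
instance (sentence : String) (out : List String) : Decidable (Spec_sentence_genr sentence out) := by unfold Spec_sentence_genr; infer_instance

-- ===== CLAIM (what is proved, stated in full; the proofs are below) =====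
def Claim_equal_sentence_genr : Prop := ∀ (sentence : String), Dom_sentence_genr sentence → Spec_sentence_genr sentence (sentence_genr sentence)

-- ===== LEMMAS AND PROOFS =====

-- proof-side split on a single space, accumulator kept reversed
def splitCh : List Char → List Char → List (List Char)
  | [], cur => [cur.reverse]
  | c :: rest, cur => if c = ' ' then cur.reverse :: splitCh rest [] else splitCh rest (c :: cur)

-- proof-side "drop the trailing empty string if present"
def dte : List String → List String
  | [] => []
  | [x] => if x = "" then [] else [x]
  | x :: y :: ys => x :: dte (y :: ys)

theorem splitCh_ne_nil (l cur : List Char) : splitCh l cur ≠ [] := by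
  induction l generalizing cur with
  | nil => simp [splitCh]
  | cons c rest ih => simp only [splitCh]; split_ifs <;> simp [ih]

theorem dte_spec (l : List String) :
    (if l.getLast? = some "" then l.dropLast else l) = dte l := by
  induction l with
  | nil => simp [dte]
  | cons x xs ih =>
    cases xs with
    | nil =>
      by_cases h : x = "" <;> simp [dte, h]
    | cons y ys =>
      simp only [dte, ← ih, List.getLast?_cons_cons]
      split_ifs <;> simp

theorem go_succ_cons (n : Nat) (c : Char) (rest cur : List Char) (accL : List (List Char)) :
    PySem.Chars.splitOn.go [' '] (n+1) (c::rest) cur accL =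
      if c = ' ' then PySem.Chars.splitOn.go [' '] n rest [] (cur.reverse :: accL)
      else PySem.Chars.splitOn.go [' '] n rest (c :: cur) accL := by
  have hpre : List.isPrefixOf [' '] (c::rest) = (c == ' ') := by
    show (' ' == c && List.isPrefixOf ([]:List Char) rest) = (c == ' ')
    rw [show List.isPrefixOf ([]:List Char) rest = true from rfl, Bool.and_true, BEq.comm]
  conv_lhs => rw [PySem.Chars.splitOn.go]
  by_cases hc : c = ' '
  · rw [if_pos (by rw [hpre, hc]; rfl), if_pos hc]
    rfl
  · rw [if_neg (by rw [hpre]; simpa using hc), if_neg hc]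

theorem go_succ_nil (n : Nat) (cur : List Char) (accL : List (List Char)) :
    PySem.Chars.splitOn.go [' '] (n+1) [] cur accL = (cur.reverse :: accL).reverse := by
  rw [PySem.Chars.splitOn.go]
  omega

theorem splitOn_go_spec (fuel : Nat) (l cur : List Char) (accL : List (List Char))
    (h : l.length < fuel) :
    PySem.Chars.splitOn.go [' '] fuel l cur accL = accL.reverse ++ splitCh l cur := by
  induction fuel generalizing l cur accL with
  | zero => omega
  | succ n ih =>
    cases l with
    | nil => rw [go_succ_nil]; simp [splitCh]
    | cons c rest =>
      rw [go_succ_cons]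
      by_cases hc : c = ' '
      · rw [if_pos hc, ih rest [] _ (by simp at h ⊢; omega)]
        simp [splitCh, hc]
      · rw [if_neg hc, ih rest (c :: cur) accL (by simp at h ⊢; omega)]
        simp [splitCh, hc]

theorem split_eq (s : String) :
    (PySem.Str.split? s " ").getD [] = (splitCh s.toList []).map String.ofList := by
  show (Option.map _ (PySem.Chars.split? s.toList " ".toList)).getD [] = _
  rw [show (" ".toList) = [' '] from rfl]
  rw [show PySem.Chars.split? s.toList [' '] = some (PySem.Chars.splitOn s.toList [' ']) from rfl]
  rw [show PySem.Chars.splitOn s.toList [' ']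
        = PySem.Chars.splitOn.go [' '] (s.toList.length + 1) s.toList [] [] from rfl]
  rw [splitOn_go_spec _ _ _ _ (by omega)]
  rfl

theorem ofList_nil : String.ofList ([]:List Char) = "" := by decide

theorem dte_cons (x : String) (l : List String) (hl : l ≠ []) :
    dte (x :: l) = x :: dte l := by
  cases l with
  | nil => exact absurd rfl hl
  | cons y ys => rfl

theorem goA_spec (cs : List Char) (w : String) (h : cs = [] → w ≠ "") :
    sentenceGenrGoA cs w = dte ((splitCh cs w.toList.reverse).map String.ofList) := by
  induction cs generalizing w with
  | nil =>
    show [w] = dte ((splitCh [] w.toList.reverse).map String.ofList)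
    rw [show splitCh [] w.toList.reverse = [w.toList.reverse.reverse] from rfl]
    simp only [List.reverse_reverse, List.map, String.ofList_toList]
    rw [show dte [w] = if w = "" then [] else [w] from rfl, if_neg (h rfl)]
  | cons c rest ih =>
    by_cases hc : c = ' '
    · subst hc
      rw [show sentenceGenrGoA (' '::rest) w
            = w :: (if rest.isEmpty then [] else sentenceGenrGoA rest "") from by
          simp [sentenceGenrGoA]]
      rw [show splitCh (' '::rest) w.toList.reverse
            = w.toList.reverse.reverse :: splitCh rest [] from by simp [splitCh]]
      simp only [List.reverse_reverse, List.map_cons, String.ofList_toList]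
      cases rest with
      | nil =>
        rw [show splitCh ([]:List Char) [] = [[]] from rfl]
        simp [dte, ofList_nil]
      | cons y ys =>
        rw [dte_cons _ _ (by simp [splitCh_ne_nil])]
        rw [show (List.isEmpty (y :: ys)) = false from rfl]
        rw [if_neg (by simp), ih "" (by simp)]
        rfl
    · rw [show sentenceGenrGoA (c::rest) w = sentenceGenrGoA rest (w.push c) from by
          simp [sentenceGenrGoA, hc]]
      rw [show splitCh (c::rest) w.toList.reverse
            = splitCh rest (c :: w.toList.reverse) from by simp [splitCh, hc]]
      rw [ih (w.push c) (by
        intro _ hEq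
        have h2 := congrArg String.toList hEq
        rw [String.toList_push] at h2
        simp at h2)]
      rw [show (w.push c).toList.reverse = c :: w.toList.reverse from by
        rw [String.toList_push, List.reverse_append]; rfl]

-- ===== VERDICT (by name: the statement is the Claim_ definition above) =====
theorem sentence_genr_spec : Claim_equal_sentence_genr := by
  intro s _
  unfold Spec_sentence_genr sentence_genr sentence_genr_alt
  rw [split_eq, dte_spec]
  by_cases h : s.toList.isEmpty
  · simp only [h, if_pos]
    simp only [List.isEmpty_iff] at h
    simp only [h, splitCh, List.reverse_nil, List.map, ofList_nil, dte]
    simp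
  · rw [if_neg h]
    have := goA_spec s.toList "" (by intro hh; simp [hh] at h)
    simpa using this
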